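-- pv_equiv track=rewrite | github.com/littlepangding/bangumi_personalized_anime_amway_system | libs/preproc.py | remove_users_by_review_count
-- ===== SOURCE A (Python) =====
-- from collections import Counter, namedtuple
--
-- def remove_users_by_review_count(all_ratings, hi=None, lo=None):
--     counter = Counter()
--     for u, _, _ in all_ratings:
--         counter[u] += 1
--
--     users = {
--         u: c
--         for u, c in counter.items()
--         if (hi is None or c <= hi) and (lo is None or c >= lo)
--     }
--     cleaned_ratings = [(u, s, r) for u, s, r in all_ratings if u in users]
--     return cleaned_ratings, counter
-- ===== SOURCE B (Python) =====
-- def remove_users_by_review_count(all_ratings, hi=None, lo=None):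
--     # Inverted index: user -> list of positions of their ratings.
--     pos = {}
--     for i, (u, _, _) in enumerate(all_ratings):
--         pos.setdefault(u, []).append(i)
--     counter = {u: len(ix) for u, ix in pos.items()}
--     # Decide each user once; collect the positions of all kept users.
--     keep = []
--     for u, ix in pos.items():
--         c = len(ix)
--         if (hi is None or c <= hi) and (lo is None or c >= lo):
--             keep.extend(ix)
--     # Restore the original order by sorting the kept positions.
--     keep.sort()
--     cleaned = [all_ratings[i] for i in keep]
--     return cleaned, counter
-- ===== Notes on version B (the rewrite author's own statement) =====
-- stated objective: alternative
-- what changed: B builds an inverted index (user -> list of positions) instead of a Counter, decides the range condition once per user (not per rating), and reconstructs the output order by sorting the kept positions, with no membership-filter pass over the ratings.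
import Mathlib
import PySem

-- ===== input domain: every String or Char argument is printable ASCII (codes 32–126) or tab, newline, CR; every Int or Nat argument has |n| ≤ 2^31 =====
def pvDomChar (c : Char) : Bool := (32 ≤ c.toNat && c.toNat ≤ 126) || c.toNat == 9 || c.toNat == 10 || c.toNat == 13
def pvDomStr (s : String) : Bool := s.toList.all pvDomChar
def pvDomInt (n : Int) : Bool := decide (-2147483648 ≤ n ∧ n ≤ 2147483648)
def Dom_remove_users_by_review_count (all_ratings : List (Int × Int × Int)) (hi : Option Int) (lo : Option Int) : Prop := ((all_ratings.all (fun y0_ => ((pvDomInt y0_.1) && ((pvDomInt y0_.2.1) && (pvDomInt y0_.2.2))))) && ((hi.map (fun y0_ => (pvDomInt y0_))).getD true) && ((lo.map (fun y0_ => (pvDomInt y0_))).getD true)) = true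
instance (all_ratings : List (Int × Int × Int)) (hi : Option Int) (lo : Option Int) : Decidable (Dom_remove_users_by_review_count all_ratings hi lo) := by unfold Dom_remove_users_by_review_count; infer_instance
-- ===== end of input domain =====

-- B replaces A's count-then-membership-filter with an inverted index (user -> positions),
-- one range decision per user, and order restoration by sorting the kept positions (alternative algorithm; return value only).

-- the range test '(hi is None or c <= hi) and (lo is None or c >= lo)' (appears verbatim in both Pythons)
def pvKeep (hi lo : Option Int) (c : Int) : Bool :=
  (match hi with | none => true | some h => decide (c ≤ h)) &&
  (match lo with | none => true | some l => decide (l ≤ c))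

-- ===== PORT A =====
def remove_users_by_review_count (all_ratings : List (Int × Int × Int)) (hi : Option Int) (lo : Option Int) : (List (Int × Int × Int)) × (List (Int × Int)) :=
  -- counter = Counter(); for u,_,_ in all_ratings: counter[u] += 1
  let counter : PySem.Dict Int Int :=
    all_ratings.foldl (fun d t => d.modify t.1 0 (· + 1)) PySem.Dict.empty
  -- users = {u: c for u, c in counter.items() if …}
  let users : PySem.Dict Int Int :=
    counter.items.foldl (fun d p => if pvKeep hi lo p.2 then d.insert p.1 p.2 else d) PySem.Dict.empty
  -- cleaned_ratings = [(u,s,r) for u,s,r in all_ratings if u in users]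
  let cleaned := all_ratings.filter (fun t => users.contains t.1)
  (cleaned, counter.items)

-- ===== PORT B =====
def remove_users_by_review_count_alt (all_ratings : List (Int × Int × Int)) (hi : Option Int) (lo : Option Int) : (List (Int × Int × Int)) × (List (Int × Int)) :=
  -- pos = {}; for i,(u,_,_) in enumerate(all_ratings): pos.setdefault(u, []).append(i)
  let pos : PySem.Dict Int (List Int) :=
    (PySem.List.enumerate all_ratings).foldl (fun d p => d.modify p.2.1 [] (· ++ [p.1])) PySem.Dict.empty
  -- counter = {u: len(ix) for u, ix in pos.items()}
  let counter : PySem.Dict Int Int :=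
    pos.items.foldl (fun d q => d.insert q.1 (q.2.length : Int)) PySem.Dict.empty
  -- keep = []; for u, ix in pos.items(): if range-ok(len(ix)): keep.extend(ix)
  let keep : List Int :=
    pos.items.foldl (fun acc q => if pvKeep hi lo (q.2.length : Int) then acc ++ q.2 else acc) []
  -- keep.sort()
  let keepSorted := PySem.List.sorted keep (fun i => i)
  -- cleaned = [all_ratings[i] for i in keep]  (every i is a valid position of all_ratings, so pyGetD is exact here)
  let cleaned := keepSorted.map (fun i => PySem.List.pyGetD all_ratings i (0, 0, 0))
  (cleaned, counter.items)

-- ===== PRECONDITION & SPEC =====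
def Spec_remove_users_by_review_count (all_ratings : List (Int × Int × Int)) (hi : Option Int) (lo : Option Int) (out : (List (Int × Int × Int)) × (List (Int × Int))) : Prop := out = remove_users_by_review_count_alt all_ratings hi lo
instance (all_ratings : List (Int × Int × Int)) (hi : Option Int) (lo : Option Int) (out : (List (Int × Int × Int)) × (List (Int × Int))) : Decidable (Spec_remove_users_by_review_count all_ratings hi lo out) := by unfold Spec_remove_users_by_review_count; infer_instance

-- ===== CLAIM (what is proved, stated in full; the proofs are below) =====
def Claim_equal_remove_users_by_review_count : Prop := ∀ (all_ratings : List (Int × Int × Int)) (hi : Option Int) (lo : Option Int), Dom_remove_users_by_review_count all_ratings hi lo → Spec_remove_users_by_review_count all_ratings hi lo (remove_users_by_review_count all_ratings hi lo)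

-- ===== LEMMAS AND PROOFS =====

-- the positions of user u among the enumerated ratings
def pvIdx (all_ratings : List (Int × Int × Int)) (u : Int) : List Int :=
  ((PySem.List.enumerate all_ratings).filter (fun p => p.2.1 == u)).map (·.1)

-- A's counter-building fold equals PySem.Dict.counter of the first components
theorem counterA_eq (all_ratings : List (Int × Int × Int)) :
    all_ratings.foldl (fun (d : PySem.Dict Int Int) t => d.modify t.1 0 (· + 1)) PySem.Dict.empty
      = PySem.Dict.counter (all_ratings.map (·.1)) := by
  rw [PySem.Dict.counter_eq_foldl, List.foldl_map]

-- membership in a dict built by a filtered-insert fold (A's `users`)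
theorem contains_foldl_filter_insert (l : List (Int × Int)) (P : Int × Int → Bool)
    (d : PySem.Dict Int Int) (u : Int) :
    (l.foldl (fun (d : PySem.Dict Int Int) p => if P p then d.insert p.1 p.2 else d) d).contains u
      = (d.contains u || l.any (fun p => P p && p.1 == u)) := by
  induction l generalizing d with
  | nil => simp
  | cons p rest ih =>
    simp only [List.foldl_cons, List.any_cons]
    by_cases hP : P p
    · rw [if_pos hP, ih, PySem.Dict.contains_insert, hP, Bool.true_and, BEq.comm]
      cases d.contains u <;> cases (p.1 == u) <;> simp
    · rw [if_neg hP, ih]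
      rw [Bool.not_eq_true] at hP
      rw [hP, Bool.false_and, Bool.false_or]

-- A side: `u in users` iff counter[u] is in range, for u occurring in the list
theorem users_contains_eq (xs : List Int) (hi lo : Option Int) (u : Int) (hu : u ∈ xs) :
    ((PySem.Dict.counter xs).items.foldl
        (fun (d : PySem.Dict Int Int) p => if pvKeep hi lo p.2 then d.insert p.1 p.2 else d)
        PySem.Dict.empty).contains u
      = pvKeep hi lo ((PySem.Dict.counter xs).getD u 0) := by
  rw [contains_foldl_filter_insert, PySem.Dict.contains_empty, Bool.false_or,
    PySem.Dict.items_counter, PySem.Dict.getD_counter, List.any_map]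
  have huset : u ∈ PySem.Set.ofList xs := by
    rw [PySem.Set.mem_ofList]; exact hu
  by_cases h : pvKeep hi lo (xs.count u) = true
  · rw [h]
    apply List.any_eq_true.mpr
    exact ⟨u, huset, by simp [h]⟩
  · rw [Bool.not_eq_true] at h
    rw [h]
    apply List.any_eq_false.mpr
    intro k hk
    by_cases hku : k = u
    · subst hku; simp [h]
    · simp [hku]

-- hence A's cleaned list is a plain filter by count-in-range
theorem cleanedA_eq (all_ratings : List (Int × Int × Int)) (hi lo : Option Int) :
    (remove_users_by_review_count all_ratings hi lo).1
      = all_ratings.filter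
          (fun t => pvKeep hi lo (((all_ratings.map (·.1)).count t.1 : Int))) := by
  unfold remove_users_by_review_count
  simp only [counterA_eq]
  apply List.filter_congr
  intro t ht
  rw [users_contains_eq (all_ratings.map (·.1)) hi lo t.1 (List.mem_map_of_mem ht),
    PySem.Dict.getD_counter]

-- B side: the inverted-index dict characterised, and its lemmas
theorem pos_items_eq (all_ratings : List (Int × Int × Int)) :
    ((PySem.List.enumerate all_ratings).foldl
        (fun (d : PySem.Dict Int (List Int)) p => d.modify p.2.1 [] (· ++ [p.1]))
        PySem.Dict.empty).items
      = (PySem.Set.ofList (all_ratings.map (·.1))).map (fun u => (u, pvIdx all_ratings u)) := by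
  set e := PySem.List.enumerate all_ratings with he
  have hkeys : (e.foldl (fun (d : PySem.Dict Int (List Int)) p => d.modify p.2.1 [] (· ++ [p.1])) PySem.Dict.empty).keys
      = PySem.Set.ofList (all_ratings.map (·.1)) := by
    rw [PySem.Dict.keys_foldl_modify_key e (fun p => p.2.1) [] (fun _ p => (· ++ [p.1]))]
    rw [PySem.Dict.keys_empty, PySem.Set.update_nil_left]
    congr 1
    have h2 : e.map (fun p => p.2) = all_ratings := PySem.List.map_snd_enumerate all_ratings 0
    calc e.map (fun p => p.2.1) = (e.map (fun p => p.2)).map (fun t => t.1) := by rw [List.map_map]; rfl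
      _ = all_ratings.map (·.1) := by rw [h2]
  have hnd : (e.foldl (fun (d : PySem.Dict Int (List Int)) p => d.modify p.2.1 [] (· ++ [p.1])) PySem.Dict.empty).keys.Nodup := by
    rw [hkeys]; exact PySem.Set.nodup_ofList _
  rw [PySem.Dict.items_eq_map_keys _ hnd [], hkeys]
  apply List.map_congr_left
  intro u _
  congr 1
  -- getD of the fold
  have : e.foldl (fun (d : PySem.Dict Int (List Int)) p => d.modify p.2.1 [] (· ++ [p.1])) PySem.Dict.empty
      = (e.map (fun p => (p.2.1, p.1))).foldl (fun d p => d.modify p.1 [] (· ++ [p.2])) PySem.Dict.empty := by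
    rw [List.foldl_map]
  rw [this, PySem.Dict.getD_foldl_modify_append, PySem.Dict.getD_empty, List.nil_append,
    List.filter_map, List.map_map]
  rfl

theorem pvIdx_length (all_ratings : List (Int × Int × Int)) (u : Int) :
    (pvIdx all_ratings u).length = (all_ratings.map (·.1)).count u := by
  unfold pvIdx
  rw [List.length_map, ← List.countP_eq_length_filter, List.count_eq_countP, List.countP_map]
  have : ∀ (xs : List (Int × Int × Int)) (s : Int),
      (PySem.List.enumerate xs s).countP (fun p => p.2.1 == u)
        = xs.countP (fun t => (fun v => v == u) ((fun x => x.1) t)) := by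
    intro xs
    induction xs with
    | nil => intro s; rfl
    | cons x xs ih =>
      intro s
      rw [PySem.List.enumerate_cons, List.countP_cons, List.countP_cons, ih]
  exact this all_ratings 0

-- mem of pvIdx characterisation

theorem mem_pvIdx (all_ratings : List (Int × Int × Int)) (u i : Int) :
    i ∈ pvIdx all_ratings u ↔ ∃ p ∈ PySem.List.enumerate all_ratings, p.2.1 = u ∧ p.1 = i := by
  unfold pvIdx
  simp only [List.mem_map, List.mem_filter, beq_iff_eq]
  constructor
  · rintro ⟨p, ⟨hp, he⟩, hi⟩; exact ⟨p, hp, he, hi⟩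
  · rintro ⟨p, hp, he, hi⟩; exact ⟨p, ⟨hp, he⟩, hi⟩

theorem fst_inj_enumerate (all_ratings : List (Int × Int × Int)) (p q : Int × (Int × Int × Int))
    (hp : p ∈ PySem.List.enumerate all_ratings) (hq : q ∈ PySem.List.enumerate all_ratings)
    (h : p.1 = q.1) : p = q := by
  rw [PySem.List.mem_enumerate_iff] at hp hq
  obtain ⟨k, hk, rfl⟩ := hp
  obtain ⟨m, hm, rfl⟩ := hq
  simp only [zero_add] at h ⊢
  have : k = m := by exact_mod_cast h
  subst this; rfl

theorem nodup_pvIdx (all_ratings : List (Int × Int × Int)) (u : Int) :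
    (pvIdx all_ratings u).Nodup := by
  unfold pvIdx
  refine List.Nodup.map_on ?_ ?_
  · intro p hp q hq h
    exact fst_inj_enumerate _ p q (List.mem_of_mem_filter hp) (List.mem_of_mem_filter hq) h
  · exact ((PySem.List.pairwise_lt_enumerate all_ratings 0).sublist List.filter_sublist).imp
      (fun h he => absurd (congrArg Prod.fst he) (ne_of_lt h))

theorem sorted_keep_eq (all_ratings : List (Int × Int × Int)) (K : Int → Bool) :
    PySem.List.sorted
      ((PySem.Set.ofList (all_ratings.map (·.1))).flatMap
        (fun u => if K u then pvIdx all_ratings u else []))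
      (fun i => i)
      = ((PySem.List.enumerate all_ratings).filter (fun p => K p.2.1)).map (·.1) := by
  set F := ((PySem.List.enumerate all_ratings).filter (fun p => K p.2.1)).map (·.1) with hF
  set keep := ((PySem.Set.ofList (all_ratings.map (·.1))).flatMap
        (fun u => if K u then pvIdx all_ratings u else [])) with hkeep
  have hFpair : F.Pairwise (· < ·) := by
    rw [hF, List.pairwise_map]
    exact (PySem.List.pairwise_lt_enumerate all_ratings 0).sublist List.filter_sublist
  have hFnd : F.Nodup := hFpair.imp (fun h => ne_of_lt h)
  have hknd : keep.Nodup := by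
    rw [hkeep, List.nodup_flatMap]
    constructor
    · intro u _
      split
      · exact nodup_pvIdx all_ratings u
      · exact List.nodup_nil
    · refine (PySem.Set.nodup_ofList _).imp ?_
      intro u v huv
      simp only [Function.onFun]
      intro i hiu hiv
      split at hiu
      · split at hiv
        · rw [mem_pvIdx] at hiu hiv
          obtain ⟨p, hp, hpu, hpi⟩ := hiu
          obtain ⟨q, hq, hqv, hqi⟩ := hiv
          have := fst_inj_enumerate _ p q hp hq (by rw [hpi, hqi])
          subst this
          exact absurd (hpu ▸ hqv) huv
        · simp at hiv
      · simp at hiu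
  have hmem : ∀ i, i ∈ F ↔ i ∈ keep := by
    intro i
    rw [hF, hkeep]
    simp only [List.mem_map, List.mem_filter, List.mem_flatMap]
    constructor
    · rintro ⟨p, ⟨hp, hK⟩, hi⟩
      refine ⟨p.2.1, ?_, ?_⟩
      · rw [PySem.Set.mem_ofList]
        have : p.2 ∈ all_ratings := by
          rw [PySem.List.mem_enumerate_iff] at hp
          obtain ⟨k, hk, rfl⟩ := hp
          simp
        exact List.mem_map_of_mem this
      · rw [if_pos hK, mem_pvIdx]
        exact ⟨p, hp, rfl, hi⟩
    · rintro ⟨u, hu, hiu⟩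
      by_cases hK : K u
      · rw [if_pos hK, mem_pvIdx] at hiu
        obtain ⟨p, hp, hpu, hpi⟩ := hiu
        exact ⟨p, ⟨hp, by rw [hpu]; exact hK⟩, hpi⟩
      · rw [if_neg hK] at hiu; simp at hiu
  have hperm : F.Perm keep := (List.perm_ext_iff_of_nodup hFnd hknd).mpr hmem
  exact PySem.List.sorted_eq_of_perm_of_pairwise_lt keep F (fun i => i) hperm hFpair

theorem map_get_filter_enumerate (all_ratings : List (Int × Int × Int)) (K : Int → Bool) :
    (((PySem.List.enumerate all_ratings).filter (fun p => K p.2.1)).map (·.1)).map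
        (fun i => PySem.List.pyGetD all_ratings i (0, 0, 0))
      = all_ratings.filter (fun t => K t.1) := by
  rw [List.map_map]
  have h1 : ((PySem.List.enumerate all_ratings).filter (fun p => K p.2.1)).map
        ((fun i => PySem.List.pyGetD all_ratings i (0, 0, 0)) ∘ (·.1))
      = ((PySem.List.enumerate all_ratings).filter (fun p => K p.2.1)).map (·.2) := by
    apply List.map_congr_left
    intro p hp
    have hp' := List.mem_of_mem_filter hp
    rw [PySem.List.mem_enumerate_iff] at hp'
    obtain ⟨k, hk, rfl⟩ := hp'
    simp only [Function.comp, zero_add]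
    rw [PySem.List.pyGetD_natCast, List.getD_eq_getElem _ _ hk]
  rw [h1]
  rw [show (fun p : Int × (Int × Int × Int) => K p.2.1)
        = ((fun t : Int × Int × Int => K t.1) ∘ (fun p : Int × (Int × Int × Int) => p.2)) from rfl,
    ← List.filter_map, PySem.List.map_snd_enumerate]

theorem cleanedB_eq (all_ratings : List (Int × Int × Int)) (hi lo : Option Int) :
    (remove_users_by_review_count_alt all_ratings hi lo).1
      = all_ratings.filter
          (fun t => pvKeep hi lo (((all_ratings.map (·.1)).count t.1 : Int))) := by
  unfold remove_users_by_review_count_alt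
  simp only [pos_items_eq, List.foldl_map]
  have hbody : (fun (acc : List Int) (u : Int) =>
        if pvKeep hi lo ((pvIdx all_ratings u).length : Int) then acc ++ pvIdx all_ratings u else acc)
      = (fun acc u => acc ++ (if pvKeep hi lo (((all_ratings.map (·.1)).count u : Int)) then pvIdx all_ratings u else [])) := by
    funext acc u
    rw [pvIdx_length]
    split
    · rfl
    · rw [List.append_nil]
  rw [hbody, PySem.List.foldl_append_eq_flatMap, List.nil_append,
    sorted_keep_eq all_ratings (fun u => pvKeep hi lo (((all_ratings.map (·.1)).count u : Int))),
    map_get_filter_enumerate all_ratings (fun u => pvKeep hi lo (((all_ratings.map (·.1)).count u : Int)))]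

theorem counterB_eq (all_ratings : List (Int × Int × Int)) (hi lo : Option Int) :
    (remove_users_by_review_count_alt all_ratings hi lo).2
      = (PySem.Dict.counter (all_ratings.map (·.1))).items := by
  unfold remove_users_by_review_count_alt
  simp only [pos_items_eq]
  rw [PySem.Dict.items_foldl_insert_fresh
      ((PySem.Set.ofList (all_ratings.map (·.1))).map (fun u => (u, pvIdx all_ratings u)))
      (fun q => q.1) (fun q => (q.2.length : Int))
      PySem.Dict.empty (by intro a _; rfl)
      (by rw [List.map_map,
            show ((fun q : Int × List Int => q.1) ∘ fun u => (u, pvIdx all_ratings u)) = id from rfl,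
            List.map_id]
          exact PySem.Set.nodup_ofList _)]
  rw [show (PySem.Dict.empty : PySem.Dict Int Int).items = [] from rfl, List.nil_append, List.map_map,
    PySem.Dict.items_counter]
  apply List.map_congr_left
  intro u _
  simp only [Function.comp]
  rw [pvIdx_length]

-- ===== VERDICT (by name: the statement is the Claim_ definition above) =====
theorem remove_users_by_review_count_spec : Claim_equal_remove_users_by_review_count := by
  intro all_ratings hi lo _
  unfold Spec_remove_users_by_review_count
  refine Prod.ext ?_ ?_
  · rw [cleanedA_eq, cleanedB_eq]
  · show (remove_users_by_review_count all_ratings hi lo).2 = _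
    rw [counterB_eq]
    unfold remove_users_by_review_count
    simp only [counterA_eq]
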